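-- pv_equiv track=rewrite | github.com/paiml/depyler | examples/hard_pattern_backtrack.py | bt_permutations_sum
-- ===== SOURCE A (Python) =====
-- def count_permutations(n: int) -> int:
--     """Count permutations of n elements = n!"""
--     if n <= 1:
--         return 1
--     result: int = 1
--     i: int = 2
--     while i <= n:
--         result = result * i
--         i = i + 1
--     return result
--
-- def bt_permutations_sum(arr: list[int]) -> int:
--     """Sum of first elements of all permutations (backtracking simulation)."""
--     n: int = len(arr)
--     if n == 0:
--         return 0
--     total: int = 0
--     perm_of_rest: int = count_permutations(n - 1)
--     i: int = 0
--     while i < n: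
--         total = total + arr[i] * perm_of_rest
--         i = i + 1
--     return total
-- ===== SOURCE B (Python) =====
-- def bt_permutations_sum(arr: list[int]) -> int:
--     """Sum of first elements of all permutations.
--
--     One fused pass: walk the array once, maintaining simultaneously the
--     running sum s, the count m of elements seen so far, and f = (m-1)!
--     (built incrementally: before consuming the (m+1)-th element, f *= m).
--     At the end f = (n-1)! and the answer is s * f.  No helper, no guard:
--     the empty array yields 0 * 1 == 0.
--     """
--     s = 0
--     f = 1
--     m = 0
--     for x in arr:
--         if m >= 1:
--             f = f * m
--         s = s + x
--         m = m + 1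
--     return s * f
-- ===== Notes on version B (the rewrite author's own statement) =====
-- stated objective: alternative
-- what changed: B replaces A's two-stage design (a separate count_permutations factorial loop, then a multiply-accumulate scan of the array) with one fused pass that maintains the running sum, the element count m and the factorial (m-1)! incrementally as loop invariants, doing a single multiply at the end; the helper and the n==0 guard disappear.
import Mathlib
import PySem

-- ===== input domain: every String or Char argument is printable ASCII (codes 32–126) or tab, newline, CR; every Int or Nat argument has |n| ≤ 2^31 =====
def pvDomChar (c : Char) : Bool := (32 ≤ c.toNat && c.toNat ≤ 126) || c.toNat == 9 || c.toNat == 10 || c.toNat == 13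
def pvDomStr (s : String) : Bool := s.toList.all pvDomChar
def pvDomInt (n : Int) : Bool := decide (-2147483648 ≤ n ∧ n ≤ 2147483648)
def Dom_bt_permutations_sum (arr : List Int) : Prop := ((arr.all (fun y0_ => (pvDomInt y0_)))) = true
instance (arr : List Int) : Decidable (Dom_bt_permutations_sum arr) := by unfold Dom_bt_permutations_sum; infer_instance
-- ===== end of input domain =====

-- B fuses A's two stages (factorial helper + multiply-accumulate scan) into one pass
-- maintaining sum, count m and (m-1)! as loop invariants; same O(n) cost, no helper, no guard.


-- ===== PORT A =====
-- 'while i <= n' product loop ported as a foldl over range(2, n+1)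
def count_permutations (n : Int) : Int :=
  if n ≤ 1 then 1
  else (PySem.List.pyRange 2 (n + 1) 1).foldl (fun result i => result * i) 1

def bt_permutations_sum (arr : List Int) : Int :=
  let n : Int := arr.length
  if n = 0 then 0
  else
    let perm_of_rest : Int := count_permutations (n - 1)
    (PySem.List.pyRange 0 n 1).foldl
      (fun total i => total + PySem.List.pyGetD arr i 0 * perm_of_rest) 0

-- ===== PORT B =====
-- single fused pass: state (s, f, m) = (running sum, (m-1)! built incrementally, count)
def bt_permutations_sum_alt (arr : List Int) : Int :=
  let r := arr.foldl
    (fun (acc : Int × Int × Int) x =>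
      let s := acc.1
      let f := acc.2.1
      let m := acc.2.2
      (s + x, (if 1 ≤ m then f * m else f), m + 1))
    (0, 1, 0)
  r.1 * r.2.1

-- ===== PRECONDITION & SPEC =====
def Spec_bt_permutations_sum (arr : List Int) (out : Int) : Prop := out = bt_permutations_sum_alt arr
instance (arr : List Int) (out : Int) : Decidable (Spec_bt_permutations_sum arr out) := by unfold Spec_bt_permutations_sum; infer_instance

-- ===== CLAIM (what is proved, stated in full; the proofs are below) =====
def Claim_equal_bt_permutations_sum : Prop := ∀ (arr : List Int), Dom_bt_permutations_sum arr → Spec_bt_permutations_sum arr (bt_permutations_sum arr)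

-- ===== LEMMAS AND PROOFS =====

-- factorial 0..k as an Int
def natF : Nat → Int
  | 0 => 1
  | (k+1) => natF k * ((k : Int) + 1)

-- rising product m * (m+1) * … * (m+k-1)
def riseProd : Int → Nat → Int
  | _, 0 => 1
  | m, (k+1) => m * riseProd (m+1) k

theorem natF_succ (k : Nat) : natF (k+1) = natF k * ((k : Int) + 1) := rfl

-- A's helper computes the factorial
theorem count_permutations_natF : ∀ (k : Nat), count_permutations (k : Int) = natF k := by
  intro k
  induction k with
  | zero => decide
  | succ k ih =>
    by_cases hk : (k : Int) + 1 ≤ 1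
    · have hk0 : k = 0 := by omega
      subst hk0; decide
    · unfold count_permutations
      rw [if_neg (by push_cast; omega)]
      rw [PySem.List.pyRange_one_succ_right (by push_cast; omega)]
      rw [List.foldl_append]
      simp only [List.foldl]
      push_cast
      by_cases hk1 : (k : Int) ≤ 1
      · have hk0 : k = 1 := by omega
        subst hk0; decide
      · have : count_permutations (k : Int)
            = (PySem.List.pyRange 2 ((k : Int) + 1) 1).foldl (fun result i => result * i) 1 := by
          unfold count_permutations; rw [if_neg hk1]
        rw [← this, ih, natF_succ]

-- invariant of B's fused loop once m ≥ 1
theorem foldB_inv : ∀ (xs : List Int) (s f m : Int), 1 ≤ m →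
    xs.foldl
      (fun (acc : Int × Int × Int) x =>
        (acc.1 + x, (if 1 ≤ acc.2.2 then acc.2.1 * acc.2.2 else acc.2.1), acc.2.2 + 1))
      (s, f, m)
    = (s + xs.sum, f * riseProd m xs.length, m + xs.length) := by
  intro xs
  induction xs with
  | nil => intro s f m _; simp [riseProd]
  | cons x xs ih =>
    intro s f m hm
    simp only [List.foldl, if_pos hm]
    rw [ih (s + x) (f * m) (m + 1) (by omega)]
    simp only [List.length_cons, List.sum_cons, riseProd, Prod.mk.injEq]
    refine ⟨by ring, by ring, by push_cast; ring⟩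

-- rising product from 1 is the factorial
theorem riseProd_natF : ∀ (k m : Nat), natF m * riseProd ((m : Int) + 1) k = natF (m + k) := by
  intro k
  induction k with
  | zero => intro m; simp [riseProd]
  | succ k ih =>
    intro m
    show natF m * (((m : Int) + 1) * riseProd ((m : Int) + 1 + 1) k) = _
    have h1 : ((m : Int) + 1 + 1) = (((m + 1 : Nat) : Int) + 1) := by push_cast; ring
    rw [h1, ← mul_assoc, ← natF_succ, ih (m + 1)]
    congr 1; omega

theorem riseProd_one (k : Nat) : riseProd 1 k = natF k := by
  have := riseProd_natF k 0
  simpa [natF] using this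

-- A's multiply-accumulate loop factored
theorem foldl_mul_acc (p : Int) : ∀ (arr : List Int) (t : Int),
    arr.foldl (fun total x => total + x * p) t = t + arr.sum * p := by
  intro arr
  induction arr with
  | nil => simp
  | cons x xs ih => intro t; simp [List.foldl, ih, List.sum_cons]; ring

-- ===== VERDICT (by name: the statement is the Claim_ definition above) =====
theorem bt_permutations_sum_spec : Claim_equal_bt_permutations_sum := by
  intro arr _
  unfold Spec_bt_permutations_sum bt_permutations_sum bt_permutations_sum_alt
  cases arr with
  | nil => simp
  | cons x xs =>
    have hne : (((x :: xs).length : Int)) ≠ 0 := by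
      simp only [List.length_cons]; push_cast; omega
    rw [if_neg hne]
    rw [PySem.List.foldl_pyRange_zero_pyGetD' (x :: xs) 0
          (fun total y => total + y * count_permutations (((x :: xs).length : Int) - 1)) 0]
    rw [foldl_mul_acc]
    have hlen : (((x :: xs).length : Int) - 1) = (xs.length : Int) := by
      simp only [List.length_cons]; push_cast; ring
    rw [hlen, count_permutations_natF]
    -- B side
    simp only [List.foldl]
    rw [show ((0 : Int) + x, (if (1:Int) ≤ 0 then (1:Int) * 0 else 1), (0:Int) + 1)
          = (x, (1 : Int), (1 : Int)) by norm_num]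
    rw [foldB_inv xs x 1 1 (by omega)]
    simp only [riseProd_one]
    simp [List.sum_cons]
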